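-- pv_equiv track=rewrite | github.com/kwakrhkr59/Explainable-WF | preprocessing/extractors.py | get_ipd_filtered
-- ===== SOURCE A (Python) =====
-- def get_ipd_filtered(traces, size_threshold=80):
--     ipd_features = []
--     for trace in traces:
--         filtered_trace = [pkt for pkt in trace if pkt[1] >= size_threshold]
--         if len(filtered_trace) > 1:
--             ipd = [filtered_trace[i][0] - filtered_trace[i - 1][0] for i in range(1, len(filtered_trace))]
--         else:
--             ipd = []
--         ipd_features.append(ipd)
--
--     return ipd_features
-- ===== SOURCE B (Python) =====
-- def _ipd_one(trace, size_threshold):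
--     ipd = []
--     prev = 0
--     seen = False
--     for pkt in trace:
--         if pkt[1] < size_threshold:
--             continue
--         if seen:
--             ipd.append(pkt[0] - prev)
--         prev = pkt[0]
--         seen = True
--     return ipd
--
-- def get_ipd_filtered(traces, size_threshold=80):
--     return [_ipd_one(trace, size_threshold) for trace in traces]
-- ===== Notes on version B (the rewrite author's own statement) =====
-- stated objective: simpler
-- what changed: Fuses the size filter and the index-based delta comprehension into one linear pass per trace that maintains a previous-timestamp/seen state, eliminating the intermediate filtered list and all index arithmetic.
import Mathlib
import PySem

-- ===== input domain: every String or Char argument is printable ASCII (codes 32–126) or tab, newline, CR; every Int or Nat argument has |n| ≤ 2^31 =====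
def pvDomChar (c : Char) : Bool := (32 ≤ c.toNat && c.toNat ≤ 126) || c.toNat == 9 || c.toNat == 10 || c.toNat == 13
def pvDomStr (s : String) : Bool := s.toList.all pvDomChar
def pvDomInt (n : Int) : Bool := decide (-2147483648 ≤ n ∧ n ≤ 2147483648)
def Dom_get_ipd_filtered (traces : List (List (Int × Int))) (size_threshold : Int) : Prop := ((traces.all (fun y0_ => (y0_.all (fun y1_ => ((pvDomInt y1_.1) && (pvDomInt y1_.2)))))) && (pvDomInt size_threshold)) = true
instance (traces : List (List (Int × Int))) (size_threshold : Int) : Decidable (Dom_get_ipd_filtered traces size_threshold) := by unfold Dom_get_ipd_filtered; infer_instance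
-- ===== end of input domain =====

-- B fuses the size filter and the delta comprehension into one stateful pass per trace (same cost, no intermediate list).

-- ===== PORT A =====
def get_ipd_filtered (traces : List (List (Int × Int))) (size_threshold : Int) : List (List Int) :=
  traces.foldl (fun ipd_features trace =>
    let filtered_trace := trace.filter (fun pkt => size_threshold ≤ pkt.2)
    let ipd : List Int :=
      if 1 < filtered_trace.length then
        (PySem.List.pyRange 1 (PySem.List.len filtered_trace) 1).map
          (fun i => (PySem.List.pyGetD filtered_trace i (0, 0)).1
                    - (PySem.List.pyGetD filtered_trace (i - 1) (0, 0)).1)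
      else []
    ipd_features ++ [ipd]) []

-- ===== PORT B =====
-- one pass per trace; state = (ipd so far, prev timestamp, seen flag)
def ipdOne (trace : List (Int × Int)) (size_threshold : Int) : List Int :=
  (trace.foldl (fun st pkt =>
      if pkt.2 < size_threshold then st
      else ((if st.2.2 then st.1 ++ [pkt.1 - st.2.1] else st.1), pkt.1, true))
    ([], 0, false)).1

def get_ipd_filtered_alt (traces : List (List (Int × Int))) (size_threshold : Int) : List (List Int) :=
  traces.map (fun trace => ipdOne trace size_threshold)

-- ===== PRECONDITION & SPEC =====
def Spec_get_ipd_filtered (traces : List (List (Int × Int))) (size_threshold : Int) (out : List (List Int)) : Prop := out = get_ipd_filtered_alt traces size_threshold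
instance (traces : List (List (Int × Int))) (size_threshold : Int) (out : List (List Int)) : Decidable (Spec_get_ipd_filtered traces size_threshold out) := by unfold Spec_get_ipd_filtered; infer_instance

-- ===== CLAIM (what is proved, stated in full; the proofs are below) =====
def Claim_equal_get_ipd_filtered : Prop := ∀ (traces : List (List (Int × Int))) (size_threshold : Int), Dom_get_ipd_filtered traces size_threshold → Spec_get_ipd_filtered traces size_threshold (get_ipd_filtered traces size_threshold)

-- ===== LEMMAS AND PROOFS =====

/-- Reference: successive differences of a list of timestamps. -/
def deltas : List Int → List Int
  | [] => []
  | [_] => []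
  | a :: b :: r => (b - a) :: deltas (b :: r)

/-- Kept timestamps of a trace. -/
def keptTs (th : Int) (l : List (Int × Int)) : List Int :=
  (l.filter (fun pkt => th ≤ pkt.2)).map Prod.fst

/-- B's inner loop after the first kept packet (prev = p). -/
def goSeen (th p : Int) : List (Int × Int) → List Int
  | [] => []
  | pkt :: r => if pkt.2 < th then goSeen th p r else (pkt.1 - p) :: goSeen th pkt.1 r

/-- B's inner loop before any kept packet. -/
def goNone (th : Int) : List (Int × Int) → List Int
  | [] => []
  | pkt :: r => if pkt.2 < th then goNone th r else goSeen th pkt.1 r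

lemma foldl_seen (th p : Int) (l : List (Int × Int)) (acc : List Int) :
    (l.foldl (fun st pkt =>
      if pkt.2 < th then st
      else ((if st.2.2 then st.1 ++ [pkt.1 - st.2.1] else st.1), pkt.1, true))
      (acc, p, true)).1 = acc ++ goSeen th p l := by
  induction l generalizing acc p with
  | nil => simp [goSeen]
  | cons pkt r ih =>
    by_cases h : pkt.2 < th
    · simp [List.foldl_cons, h, goSeen, ih]
    · simp [List.foldl_cons, h, goSeen, ih]

lemma foldl_none (th : Int) (l : List (Int × Int)) (acc : List Int) (p : Int) :
    (l.foldl (fun st pkt =>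
      if pkt.2 < th then st
      else ((if st.2.2 then st.1 ++ [pkt.1 - st.2.1] else st.1), pkt.1, true))
      (acc, p, false)).1 = acc ++ goNone th l := by
  induction l generalizing p with
  | nil => simp [goNone]
  | cons pkt r ih =>
    by_cases h : pkt.2 < th
    · simp [List.foldl_cons, h, goNone, ih]
    · simp [List.foldl_cons, h, goNone, foldl_seen]

lemma goSeen_eq_deltas (th p : Int) (l : List (Int × Int)) :
    goSeen th p l = deltas (p :: keptTs th l) := by
  induction l generalizing p with
  | nil => simp [goSeen, keptTs, deltas]
  | cons pkt r ih =>
    by_cases h : pkt.2 < th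
    · simpa [goSeen, h, keptTs, show ¬ (th ≤ pkt.2) by omega] using ih p
    · simpa [goSeen, h, keptTs, show th ≤ pkt.2 by omega, deltas] using ih pkt.1

lemma goNone_eq_deltas (th : Int) (l : List (Int × Int)) :
    goNone th l = deltas (keptTs th l) := by
  induction l with
  | nil => simp [goNone, keptTs, deltas]
  | cons pkt r ih =>
    by_cases h : pkt.2 < th
    · simpa [goNone, h, keptTs, show ¬ (th ≤ pkt.2) by omega] using ih
    · simpa [goNone, h, keptTs, show th ≤ pkt.2 by omega] using goSeen_eq_deltas th pkt.1 r

lemma ipdOne_eq_deltas (trace : List (Int × Int)) (th : Int) :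
    ipdOne trace th = deltas (keptTs th trace) := by
  unfold ipdOne
  rw [foldl_none, goNone_eq_deltas]
  simp

/-- A's index comprehension over a filtered list equals `deltas` of its timestamps. -/
lemma map_range_eq_deltas (f : List (Int × Int)) :
    (PySem.List.pyRange 1 (PySem.List.len f) 1).map
      (fun i => (PySem.List.pyGetD f i (0, 0)).1 - (PySem.List.pyGetD f (i - 1) (0, 0)).1)
      = deltas (f.map Prod.fst) := by
  rw [PySem.List.len_eq, PySem.List.pyRange_one, List.map_map]
  induction f with
  | nil => simp [deltas]
  | cons a r ih =>
    cases r with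
    | nil => simp [deltas]
    | cons b s =>
      have hlen : ((((a :: b :: s).length : Int) - 1)).toNat = s.length + 1 := by simp
      have hlen2 : ((((b :: s).length : Int) - 1)).toNat = s.length := by simp
      rw [hlen2] at ih
      rw [hlen, List.range_succ_eq_map]
      simp only [List.map_cons, List.map_map]
      refine List.cons_eq_cons.mpr ⟨?_, ?_⟩
      · show (PySem.List.pyGetD (a :: b :: s) (1 + ((0 : Nat) : Int)) (0, 0)).1
             - (PySem.List.pyGetD (a :: b :: s) (1 + ((0 : Nat) : Int) - 1) (0, 0)).1 = b.1 - a.1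
        norm_num [PySem.List.pyGetD]
      · show List.map _ (List.range s.length) = deltas (b.1 :: List.map Prod.fst s)
        rw [show (b.1 :: List.map Prod.fst s) = List.map Prod.fst (b :: s) from rfl, ← ih]
        apply List.map_congr_left
        intro k hk
        show (PySem.List.pyGetD (a :: b :: s) (1 + ((k + 1 : Nat) : Int)) (0, 0)).1
             - (PySem.List.pyGetD (a :: b :: s) (1 + ((k + 1 : Nat) : Int) - 1) (0, 0)).1
           = (PySem.List.pyGetD (b :: s) (1 + (k : Int)) (0, 0)).1
             - (PySem.List.pyGetD (b :: s) (1 + (k : Int) - 1) (0, 0)).1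
        have e1 : (1 : Int) + ((k + 1 : Nat) : Int) = ((k + 2 : Nat) : Int) := by push_cast; ring
        have e2 : (1 : Int) + ((k + 1 : Nat) : Int) - 1 = ((k + 1 : Nat) : Int) := by push_cast; ring
        have e3 : (1 : Int) + (k : Int) = ((k + 1 : Nat) : Int) := by push_cast; ring
        have e4 : (1 : Int) + (k : Int) - 1 = ((k : Nat) : Int) := by omega
        rw [e2, e1, e4, e3]
        simp only [PySem.List.pyGetD_natCast]
        simp

lemma perTrace_eq (trace : List (Int × Int)) (th : Int) :
    (let filtered_trace := trace.filter (fun pkt => th ≤ pkt.2)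
     if 1 < filtered_trace.length then
       (PySem.List.pyRange 1 (PySem.List.len filtered_trace) 1).map
         (fun i => (PySem.List.pyGetD filtered_trace i (0, 0)).1
                   - (PySem.List.pyGetD filtered_trace (i - 1) (0, 0)).1)
     else []) = ipdOne trace th := by
  rw [ipdOne_eq_deltas]
  set f := trace.filter (fun pkt => th ≤ pkt.2) with hf
  have hk : keptTs th trace = f.map Prod.fst := by simp [keptTs, hf]
  rw [hk]
  by_cases h : 1 < f.length
  · simp only [h, if_true]; exact map_range_eq_deltas f
  · simp only [h, if_false]
    match f, h with
    | [], _ => simp [deltas]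
    | [a], _ => simp [deltas]
    | a :: b :: r, h => simp at h

-- ===== VERDICT (by name: the statement is the Claim_ definition above) =====
theorem get_ipd_filtered_spec : Claim_equal_get_ipd_filtered := by
  intro traces th _
  show get_ipd_filtered traces th = get_ipd_filtered_alt traces th
  unfold get_ipd_filtered get_ipd_filtered_alt
  rw [PySem.List.foldl_append_singleton_eq_map]
  exact List.map_congr_left (fun trace _ => perTrace_eq trace th)
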